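-- pv_equiv track=rewrite | github.com/zentralopensource/zentral | zentral/core/events/utils.py | decode_args
-- ===== SOURCE A (Python) =====
-- def decode_args(s, delimiter="|", escapechar="\\"):
--     args = []
--     escaping = False
--     current_arg = ""
--     for c in s:
--         if escaping:
--             current_arg += c
--             escaping = False
--         elif c == escapechar:
--             escaping = True
--         elif c == delimiter:
--             args.append(current_arg)
--             current_arg = ""
--         else:
--             current_arg += c
--     args.append(current_arg)
--     return args
-- ===== SOURCE B (Python) =====
-- def decode_args(s, delimiter="|", escapechar="\\"):
--     # pass 1: cut s into raw fields (escape pairs kept intact) at unescaped delimiters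
--     raw = []
--     start = 0
--     i = 0
--     n = len(s)
--     while i < n:
--         c = s[i]
--         if c == escapechar:
--             i += 2
--         elif c == delimiter:
--             raw.append(s[start:i])
--             i += 1
--             start = i
--         else:
--             i += 1
--     raw.append(s[start:])
--     # pass 2: decode each raw field: escapechar+X -> X, a dangling trailing escapechar vanishes
--     out = []
--     for f in raw:
--         buf = []
--         j = 0
--         m = len(f)
--         while j < m:
--             if f[j] == escapechar:
--                 if j + 1 < m:
--                     buf.append(f[j + 1])
--                 j += 2
--             else:
--                 buf.append(f[j])
--                 j += 1
--         out.append("".join(buf))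
--     return out
-- ===== Notes on version B (the rewrite author's own statement) =====
-- stated objective: alternative
-- what changed: Replaces A's single stateful fold with an escaping flag by a two-phase recursive algorithm: first split the string into raw fields at unescaped delimiters (escape pairs consumed as units), then decode escape pairs in each field with a separate recursive pass.
import Mathlib
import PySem

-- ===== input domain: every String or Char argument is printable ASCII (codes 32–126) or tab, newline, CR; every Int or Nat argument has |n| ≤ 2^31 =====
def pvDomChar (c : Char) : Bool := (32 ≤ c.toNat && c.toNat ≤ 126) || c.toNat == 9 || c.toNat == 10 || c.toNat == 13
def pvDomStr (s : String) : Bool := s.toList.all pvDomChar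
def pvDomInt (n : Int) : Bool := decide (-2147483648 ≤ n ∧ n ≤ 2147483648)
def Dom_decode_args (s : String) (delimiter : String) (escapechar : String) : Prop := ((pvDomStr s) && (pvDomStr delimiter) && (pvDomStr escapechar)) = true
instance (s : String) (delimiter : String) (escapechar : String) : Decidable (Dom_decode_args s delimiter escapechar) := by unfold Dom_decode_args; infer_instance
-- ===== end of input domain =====

-- B replaces A's one-pass escaping-flag fold by two passes: split into raw fields at unescaped delimiters, then decode escapes per field; same values, same cost (objective: alternative).

-- ===== PORT A =====
-- loop body of A's for-loop; state = (args, escaping, current_arg); Python's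
-- `c == escapechar` compares the 1-char string [c] to the whole string escapechar
def aStep (escapechar delimiter : List Char) (st : List (List Char) × Bool × List Char)
    (c : Char) : List (List Char) × Bool × List Char :=
  if st.2.1 then (st.1, false, st.2.2 ++ [c])
  else if [c] == escapechar then (st.1, true, st.2.2)
  else if [c] == delimiter then (st.1 ++ [st.2.2], false, ([] : List Char))
  else (st.1, false, st.2.2 ++ [c])

def decode_args (s : String) (delimiter : String) (escapechar : String) : List String :=
  let st := s.toList.foldl (aStep escapechar.toList delimiter.toList) ([], false, [])
  (st.1 ++ [st.2.2]).map String.mk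

-- ===== PORT B =====
-- Source B's pass-1 while loop; s[i] = cs[i]! (0 ≤ i < n), the slice s[start:i]
-- (0 ≤ start ≤ i) = (cs.drop start).take (i - start) — exact on this index range
def altSplitLoop (delim esc : List Char) (cs : List Char) (i start : Nat)
    (raw : List (List Char)) : List (List Char) :=
  if h : i < cs.length then
    if [cs[i]!] == esc then altSplitLoop delim esc cs (i + 2) start raw
    else if [cs[i]!] == delim then
      altSplitLoop delim esc cs (i + 1) (i + 1) (raw ++ [(cs.drop start).take (i - start)])
    else altSplitLoop delim esc cs (i + 1) start raw
  else raw ++ [cs.drop start]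
termination_by cs.length - i
decreasing_by all_goals omega

-- Source B's pass-2 inner while loop over one raw field
def altDecodeLoop (esc : List Char) (f : List Char) (j : Nat) (buf : List Char) : List Char :=
  if h : j < f.length then
    if [f[j]!] == esc then
      altDecodeLoop esc f (j + 2) (buf ++ (if j + 1 < f.length then [f[j + 1]!] else []))
    else altDecodeLoop esc f (j + 1) (buf ++ [f[j]!])
  else buf
termination_by f.length - j
decreasing_by all_goals omega

def decode_args_alt (s : String) (delimiter : String) (escapechar : String) : List String :=
  (altSplitLoop delimiter.toList escapechar.toList s.toList 0 0 []).map
    (fun f => String.mk (altDecodeLoop escapechar.toList f 0 []))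

-- ===== PRECONDITION & SPEC =====
def Spec_decode_args (s : String) (delimiter : String) (escapechar : String) (out : List String) : Prop := out = decode_args_alt s delimiter escapechar
instance (s : String) (delimiter : String) (escapechar : String) (out : List String) : Decidable (Spec_decode_args s delimiter escapechar out) := by unfold Spec_decode_args; infer_instance

-- ===== CLAIM (what is proved, stated in full; the proofs are below) =====
def Claim_equal_decode_args : Prop := ∀ (s : String) (delimiter : String) (escapechar : String), Dom_decode_args s delimiter escapechar → Spec_decode_args s delimiter escapechar (decode_args s delimiter escapechar)

-- ===== LEMMAS AND PROOFS =====

-- proof-only recursive model of pass 1: raw fields of l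
def gRaw (delim esc : List Char) : List Char → List (List Char)
  | [] => [[]]
  | c :: rest =>
    if [c] == esc then
      let r := gRaw delim esc (rest.drop 1)
      ((c :: rest.take 1) ++ r.headD []) :: r.tail
    else if [c] == delim then
      [] :: gRaw delim esc rest
    else
      let r := gRaw delim esc rest
      (c :: r.headD []) :: r.tail
termination_by l => l.length
decreasing_by all_goals simp

-- proof-only recursive model of pass 2: decode escape pairs
def gUnescape (esc : List Char) : List Char → List Char
  | [] => []
  | c :: rest =>
    if [c] == esc then rest.take 1 ++ gUnescape esc (rest.drop 1)
    else c :: gUnescape esc rest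
termination_by l => l.length
decreasing_by all_goals simp

theorem gRaw_ne_nil (delim esc : List Char) (l : List Char) :
    gRaw delim esc l ≠ [] := by
  cases l with
  | nil => simp [gRaw]
  | cons c rest =>
    simp only [gRaw]
    split_ifs <;> simp

-- B's decoded fields of l
def gFields (delim esc : List Char) (l : List Char) : List (List Char) :=
  (gRaw delim esc l).map (gUnescape esc)

theorem gFields_ne_nil (delim esc : List Char) (l : List Char) :
    gFields delim esc l ≠ [] := by
  simp [gFields, gRaw_ne_nil]

theorem getBang_of_drop (cs : List Char) (i : Nat) (c : Char) (rem : List Char)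
    (h : cs.drop i = c :: rem) : cs[i]! = c := by
  have hi : i < cs.length := by
    by_contra hn
    push_neg at hn
    rw [List.drop_eq_nil_of_le hn] at h
    cases h
  have h0 : (cs.drop i)[0]'(by simp [h]) = c := by simp [h]
  rw [List.getElem_drop] at h0
  rw [getElem!_pos cs i hi]
  simpa using h0

-- A's fold from a non-escaping state = args ++ (B's fields, pending current_arg
-- prepended to the first field)
theorem main_inv (delim esc : List Char) :
    ∀ (n : ℕ) (l : List Char), l.length ≤ n → ∀ (args : List (List Char)) (cur : List Char),
      (let st := l.foldl (aStep esc delim) (args, false, cur)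
       st.1 ++ [st.2.2]) =
      args ++ (cur ++ (gFields delim esc l).headD []) :: (gFields delim esc l).tail := by
  intro n
  induction n with
  | zero =>
    intro l hl args cur
    have : l = [] := List.length_eq_zero_iff.mp (Nat.le_zero.mp hl)
    subst this
    simp [gFields, gRaw, gUnescape]
  | succ n ih =>
    intro l hl args cur
    cases l with
    | nil => simp [gFields, gRaw, gUnescape]
    | cons c rest =>
      simp only [List.length_cons, Nat.succ_le_succ_iff] at hl
      by_cases hesc : [c] == esc
      · cases rest with
        | nil =>
          -- trailing escapechar: A drops it, B's unescape drops it too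
          simp [aStep, hesc, gFields, gRaw, gUnescape]
        | cons c2 rest2 =>
          have h2 : rest2.length ≤ n := by simp at hl; omega
          have hA : (c :: c2 :: rest2).foldl (aStep esc delim) (args, false, cur)
              = rest2.foldl (aStep esc delim) (args, false, cur ++ [c2]) := by
            simp [List.foldl, aStep, hesc]
          rw [hA, ih rest2 h2 args (cur ++ [c2])]
          have hne := gRaw_ne_nil delim esc rest2
          have hB : gFields delim esc (c :: c2 :: rest2)
              = (c2 :: gUnescape esc ((gRaw delim esc rest2).headD []))
                  :: ((gRaw delim esc rest2).tail.map (gUnescape esc)) := by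
            simp only [gFields, gRaw, hesc, if_pos, List.take, List.drop]
            simp [gUnescape, hesc]
          rw [hB]
          simp only [gFields]
          cases hsp : gRaw delim esc rest2 with
          | nil => exact absurd hsp hne
          | cons f fs => simp
      · by_cases hdel : [c] == delim
        · have h1 : rest.length ≤ n := hl
          have hA : (c :: rest).foldl (aStep esc delim) (args, false, cur)
              = rest.foldl (aStep esc delim) (args ++ [cur], false, []) := by
            simp [List.foldl, aStep, hesc, hdel]
          rw [hA, ih rest h1 (args ++ [cur]) []]
          have hB : gFields delim esc (c :: rest) = [] :: gFields delim esc rest := by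
            simp [gFields, gRaw, hesc, hdel, gUnescape]
          rw [hB]
          have hne := gFields_ne_nil delim esc rest
          cases hg : gFields delim esc rest with
          | nil => exact absurd hg hne
          | cons f fs => simp
        · have h1 : rest.length ≤ n := hl
          have hA : (c :: rest).foldl (aStep esc delim) (args, false, cur)
              = rest.foldl (aStep esc delim) (args, false, cur ++ [c]) := by
            simp [List.foldl, aStep, hesc, hdel]
          rw [hA, ih rest h1 args (cur ++ [c])]
          have hne := gRaw_ne_nil delim esc rest
          have hB : gFields delim esc (c :: rest)
              = (c :: gUnescape esc ((gRaw delim esc rest).headD []))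
                  :: ((gRaw delim esc rest).tail.map (gUnescape esc)) := by
            simp only [gFields, gRaw, hesc, hdel]
            simp [gUnescape, hesc]
          rw [hB]
          simp only [gFields]
          cases hsp : gRaw delim esc rest with
          | nil => exact absurd hsp hne
          | cons f fs => simp

-- B's pass-1 loop computes gRaw of the unread suffix, with the pending raw slice
-- prepended to its first field
theorem splitLoop_eq (delim esc : List Char) (cs : List Char) :
    ∀ (k i start : Nat) (raw : List (List Char)), cs.length - i ≤ k → start ≤ i →
      altSplitLoop delim esc cs i start raw =
        raw ++ ((cs.drop start).take (i - start) ++ (gRaw delim esc (cs.drop i)).headD [])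
          :: (gRaw delim esc (cs.drop i)).tail := by
  intro k
  induction k with
  | zero =>
    intro i start raw hk hsi
    have hi : cs.length ≤ i := by omega
    rw [altSplitLoop]
    simp only [dif_neg (by omega : ¬ i < cs.length)]
    rw [List.drop_eq_nil_of_le hi]
    rw [List.take_of_length_le (by simp; omega)]
    simp [gRaw]
  | succ k ih =>
    intro i start raw hk hsi
    cases hrem : cs.drop i with
    | nil =>
      have hi : cs.length ≤ i := by
        by_contra hn
        push_neg at hn
        have := List.drop_eq_nil_iff.mp hrem
        omega
      rw [altSplitLoop]
      simp only [dif_neg (by omega : ¬ i < cs.length)]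
      rw [List.take_of_length_le (by simp; omega)]
      simp [gRaw]
    | cons c rem =>
      have hi : i < cs.length := by
        by_contra hn
        push_neg at hn
        rw [List.drop_eq_nil_of_le hn] at hrem
        cases hrem
      have hc : cs[i]! = c := getBang_of_drop cs i c rem hrem
      have hP : ∀ m : Nat, (cs.drop start).take (i - start + m)
          = (cs.drop start).take (i - start) ++ (cs.drop i).take m := by
        intro m
        rw [List.take_add]
        congr 1
        congr 1
        rw [List.drop_drop]
        congr 1
        omega
      rw [altSplitLoop]
      simp only [dif_pos hi, hc]
      by_cases hesc : [c] == esc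
      · simp only [hesc, if_pos]
        rw [ih (i + 2) start raw (by omega) (by omega)]
        have hdrop2 : cs.drop (i + 2) = rem.drop 1 := by
          rw [← List.drop_drop (i := 2) (j := i), hrem]
          rfl
        rw [hdrop2]
        have hne := gRaw_ne_nil delim esc (rem.drop 1)
        simp only [gRaw, hesc, if_pos]
        cases hsp : gRaw delim esc (rem.drop 1) with
        | nil => exact absurd hsp hne
        | cons f fs =>
          simp only [List.headD_cons, List.tail_cons]
          have := hP 2
          rw [show i + 2 - start = i - start + 2 by omega, this, hrem]
          cases rem <;> simp
      · by_cases hdel : [c] == delim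
        · simp only [hesc, if_neg, hdel, if_pos, Bool.false_eq_true]
          rw [ih (i + 1) (i + 1) _ (by omega) (by omega)]
          have hdrop1 : cs.drop (i + 1) = rem := by
            rw [← List.drop_drop (i := 1) (j := i), hrem]
            rfl
          rw [hdrop1]
          have hne := gRaw_ne_nil delim esc rem
          simp only [gRaw, hesc, hdel, if_neg, if_pos, Bool.false_eq_true]
          cases hsp : gRaw delim esc rem with
          | nil => exact absurd hsp hne
          | cons f fs => simp
        · simp only [hesc, hdel, if_neg, Bool.false_eq_true]
          rw [ih (i + 1) start raw (by omega) (by omega)]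
          have hdrop1 : cs.drop (i + 1) = rem := by
            rw [← List.drop_drop (i := 1) (j := i), hrem]
            rfl
          rw [hdrop1]
          have hne := gRaw_ne_nil delim esc rem
          simp only [gRaw, hesc, hdel, if_neg, Bool.false_eq_true]
          cases hsp : gRaw delim esc rem with
          | nil => exact absurd hsp hne
          | cons f fs =>
            simp only [List.headD_cons, List.tail_cons]
            have := hP 1
            rw [show i + 1 - start = i - start + 1 by omega, this, hrem]
            simp
-- B's pass-2 loop computes gUnescape of the unread suffix
theorem decodeLoop_eq (esc : List Char) (f : List Char) :
    ∀ (k j : Nat) (buf : List Char), f.length - j ≤ k →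
      altDecodeLoop esc f j buf = buf ++ gUnescape esc (f.drop j) := by
  intro k
  induction k with
  | zero =>
    intro j buf hk
    rw [altDecodeLoop]
    simp only [dif_neg (by omega : ¬ j < f.length)]
    rw [List.drop_eq_nil_of_le (by omega)]
    simp [gUnescape]
  | succ k ih =>
    intro j buf hk
    cases hrem : f.drop j with
    | nil =>
      have hj : f.length ≤ j := by
        by_contra hn
        push_neg at hn
        have := List.drop_eq_nil_iff.mp hrem
        omega
      rw [altDecodeLoop]
      simp only [dif_neg (by omega : ¬ j < f.length)]
      simp [gUnescape]
    | cons c w =>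
      have hj : j < f.length := by
        by_contra hn
        push_neg at hn
        rw [List.drop_eq_nil_of_le hn] at hrem
        cases hrem
      have hc : f[j]! = c := getBang_of_drop f j c w hrem
      have hdrop1 : f.drop (j + 1) = w := by
        rw [← List.drop_drop (i := 1) (j := j), hrem]
        rfl
      rw [altDecodeLoop]
      simp only [dif_pos hj, hc]
      by_cases hesc : [c] == esc
      · simp only [hesc, if_pos]
        have hdrop2 : f.drop (j + 2) = w.drop 1 := by
          rw [← List.drop_drop (i := 2) (j := j), hrem]
          rfl
        have hnext : (if j + 1 < f.length then [f[j + 1]!] else []) = w.take 1 := by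
          cases hw : w with
          | nil =>
            have : f.length ≤ j + 1 := by
              have := congrArg List.length hrem
              simp [hw] at this
              omega
            simp [if_neg (by omega : ¬ j + 1 < f.length)]
          | cons c2 w' =>
            have hc2 : f[j + 1]! = c2 := by
              apply getBang_of_drop f (j + 1) c2 w'
              rw [hdrop1, hw]
            have : j + 1 < f.length := by
              have := congrArg List.length hrem
              simp [hw] at this
              omega
            simp [if_pos this, hc2]
        rw [hnext, ih (j + 2) _ (by omega), hdrop2]
        simp [gUnescape, hesc]
      · simp only [hesc, if_neg, Bool.false_eq_true]
        rw [ih (j + 1) _ (by omega), hdrop1]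
        simp [gUnescape, hesc]

-- ===== VERDICT (by name: the statement is the Claim_ definition above) =====
theorem decode_args_spec : Claim_equal_decode_args := by
  intro s delimiter escapechar _
  unfold Spec_decode_args decode_args decode_args_alt
  have h := main_inv delimiter.toList escapechar.toList s.toList.length s.toList le_rfl [] []
  show ((s.toList.foldl (aStep escapechar.toList delimiter.toList) ([], false, [])).1
      ++ [(s.toList.foldl (aStep escapechar.toList delimiter.toList) ([], false, [])).2.2]).map String.mk = _
  rw [h]
  have hsplit : altSplitLoop delimiter.toList escapechar.toList s.toList 0 0 []
      = gRaw delimiter.toList escapechar.toList s.toList := by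
    rw [splitLoop_eq delimiter.toList escapechar.toList s.toList s.toList.length 0 0 [] (by omega) le_rfl]
    have hne := gRaw_ne_nil delimiter.toList escapechar.toList s.toList
    cases hsp : gRaw delimiter.toList escapechar.toList s.toList with
    | nil => exact absurd hsp hne
    | cons f fs => simp [hsp]
  have hdec : ∀ f : List Char, altDecodeLoop escapechar.toList f 0 []
      = gUnescape escapechar.toList f := by
    intro f
    rw [decodeLoop_eq escapechar.toList f f.length 0 [] (by omega)]
    simp
  have hmap : (altSplitLoop delimiter.toList escapechar.toList s.toList 0 0 []).map
      (fun f => String.mk (altDecodeLoop escapechar.toList f 0 []))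
      = (gFields delimiter.toList escapechar.toList s.toList).map String.mk := by
    rw [hsplit]
    simp [gFields, List.map_map, hdec]
  rw [hmap]
  have hne := gFields_ne_nil delimiter.toList escapechar.toList s.toList
  cases hg : gFields delimiter.toList escapechar.toList s.toList with
  | nil => exact absurd hg hne
  | cons f fs => simp
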